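-- pv_equiv track=rewrite | github.com/joshuboi77/Python_Dictionary | generate_python_dictionary_js.py | to_python_dictionary_js
-- ===== SOURCE A (Python) =====
-- from typing import Dict, List, Optional, Tuple
--
-- def js_escape(s: str) -> str:
--     if s is None:
--         return ''
--     # Escape backslashes and single quotes for safe JS string literals
--     s = s.replace('\\', '\\\\').replace("'", "\\'")
--     # Normalize CRLF and handle newlines in descriptions
--     s = s.replace('\r\n', '\n').replace('\n', '\\n')
--     return s
--
-- def to_python_dictionary_js(merged_items: Dict[str, Dict[str, Optional[str]]]) -> str:
--     # Group by type for sections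
--     sections: List[Tuple[str, str]] = [
--         ('Keywords', 'keyword'),
--         ('Builtins', 'builtin'),
--         ('Operators & Delimiters', 'operator')
--     ]
--     lines: List[str] = []
--     lines.append("// Auto-generated from Python_Dictionary.md. Do not edit manually.")
--     lines.append("module.exports = {")
--     lines.append("  title: 'Python Language Reference',")
--     lines.append("  sections: [")
--
--     for si, (title, typ) in enumerate(sections):
--         lines.append("    {")
--         lines.append("      title: '%s'," % js_escape(title))
--         lines.append("      items: [")
--         section_items = [it for it in merged_items.values() if (it.get('type') == typ)]
--         section_items.sort(key=lambda x: (x.get('token') or '').lower())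
--         for ii, it in enumerate(section_items):
--             comma = ',' if ii < len(section_items) - 1 else ''
--             lines.append(
--                 "        { token: '%s', type: '%s', description: '%s'%s }%s" % (
--                     js_escape(it.get('token') or ''),
--                     js_escape(it.get('type') or ''),
--                     js_escape(it.get('description') or ''),
--                     (", example: '%s'" % js_escape(it.get('example') or '')) if (it.get('example')) else '',
--                     comma)
--             )
--         lines.append("      ]")
--         lines.append("    }%s" % (',' if si < len(sections) - 1 else ''))
--
--     lines.append("  ]")
--     lines.append("};")
--     lines.append("")
--     return '\n'.join(lines)
-- ===== SOURCE B (Python) =====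
-- def js_escape(s: str) -> str:
--     if s is None:
--         return ''
--     s = s.replace('\\', '\\\\').replace("'", "\\'")
--     s = s.replace('\r\n', '\n').replace('\n', '\\n')
--     return s
--
-- def _item_line(it, comma):
--     ex = it.get('example')
--     ex_part = (", example: '%s'" % js_escape(ex)) if ex else ''
--     return "        { token: '%s', type: '%s', description: '%s'%s }%s" % (
--         js_escape(it.get('token') or ''),
--         js_escape(it.get('type') or ''),
--         js_escape(it.get('description') or ''),
--         ex_part, comma)
--
-- def to_python_dictionary_js(merged_items):
--     sections = [('Keywords', 'keyword'),
--                 ('Builtins', 'builtin'),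
--                 ('Operators & Delimiters', 'operator')]
--     # one pass: bucket the items by type (only the three section types)
--     groups = {typ: [] for _, typ in sections}
--     for it in merged_items.values():
--         t = it.get('type')
--         if t in groups:
--             groups[t] = groups[t] + [it]
--     head = ("// Auto-generated from Python_Dictionary.md. Do not edit manually.\n"
--             "module.exports = {\n"
--             "  title: 'Python Language Reference',\n"
--             "  sections: [\n")
--     blocks = []
--     for si, (title, typ) in enumerate(sections):
--         items = sorted(groups[typ], key=lambda x: (x.get('token') or '').lower())
--         body = '\n'.join(_item_line(it, ',' if i < len(items) - 1 else '')
--                          for i, it in enumerate(items))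
--         blocks.append("    {\n      title: '%s',\n      items: [\n" % js_escape(title)
--                       + (body + '\n' if items else '')
--                       + "      ]\n    }" + (',' if si < len(sections) - 1 else ''))
--     return head + '\n'.join(blocks) + "\n  ]\n};\n"
-- ===== Notes on version B (the rewrite author's own statement) =====
-- stated objective: alternative
-- what changed: B replaces A's per-section filter pass over all values by a single grouping pass that buckets items by type, and builds each section block as one string joined at the end instead of appending to one global lines list.
import Mathlib
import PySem

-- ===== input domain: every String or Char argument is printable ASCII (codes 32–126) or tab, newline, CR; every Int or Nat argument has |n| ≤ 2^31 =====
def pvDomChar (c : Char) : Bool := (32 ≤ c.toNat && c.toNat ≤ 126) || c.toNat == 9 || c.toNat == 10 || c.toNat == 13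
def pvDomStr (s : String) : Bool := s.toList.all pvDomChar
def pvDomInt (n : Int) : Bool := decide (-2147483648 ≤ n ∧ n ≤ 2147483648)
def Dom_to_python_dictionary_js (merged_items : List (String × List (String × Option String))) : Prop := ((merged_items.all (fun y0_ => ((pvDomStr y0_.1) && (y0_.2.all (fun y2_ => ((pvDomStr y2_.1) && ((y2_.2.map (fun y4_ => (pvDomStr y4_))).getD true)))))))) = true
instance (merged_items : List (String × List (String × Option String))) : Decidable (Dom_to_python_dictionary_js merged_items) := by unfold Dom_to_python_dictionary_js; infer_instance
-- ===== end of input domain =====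

set_option maxRecDepth 8000


-- B replaces A's per-section filter passes by one grouping pass over the values and
-- assembles each section block as a single string instead of a global lines list (objective: alternative decomposition, same output bytes).

-- ===== PORT A =====
-- js_escape (module-level helper, shared by both Pythons)
def jsEscape (s : String) : String :=
  let s := PySem.Str.replace (PySem.Str.replace s "\\" "\\\\") "'" "\\'"
  let s := PySem.Str.replace (PySem.Str.replace s "\r\n" "\n") "\n" "\\n"
  s

-- it.get(k) on an inner dict (value None and key-missing both give none)
def dget (it : List (String × Option String)) (k : String) : Option String :=
  ((PySem.Dict.ofList it).get? k).join

def to_python_dictionary_js (merged_items : List (String × List (String × Option String))) : String :=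
  let sections : List (String × String) :=
    [("Keywords", "keyword"), ("Builtins", "builtin"), ("Operators & Delimiters", "operator")]
  let lines : List String :=
    ["// Auto-generated from Python_Dictionary.md. Do not edit manually.",
     "module.exports = {",
     "  title: 'Python Language Reference',",
     "  sections: ["]
  let lines := (PySem.List.enumerate sections).foldl (fun lines st =>
    let si := st.1
    let title := st.2.1
    let typ := st.2.2
    let lines := lines ++ ["    {", "      title: '" ++ jsEscape title ++ "',", "      items: ["]
    let section_items :=
      ((PySem.Dict.ofList merged_items).values).filter (fun it => dget it "type" == some typ)
    let section_items :=
      PySem.List.sorted section_items (fun x => PySem.Str.lower ((dget x "token").getD ""))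
    let lines := (PySem.List.enumerate section_items).foldl (fun lines p =>
      let comma := if p.1 < (section_items.length : Int) - 1 then "," else ""
      lines ++ ["        { token: '" ++ jsEscape ((dget p.2 "token").getD "") ++ "', type: '"
        ++ jsEscape ((dget p.2 "type").getD "") ++ "', description: '"
        ++ jsEscape ((dget p.2 "description").getD "") ++ "'"
        ++ (match dget p.2 "example" with
            | some e => if e ≠ "" then ", example: '" ++ jsEscape e ++ "'" else ""
            | none => "")
        ++ " }" ++ comma]) lines
    lines ++ ["      ]", "    }" ++ (if si < (sections.length : Int) - 1 then "," else "")]) lines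
  PySem.Str.join "\n" (lines ++ ["  ]", "};", ""])

-- ===== PORT B =====
def itemLineB (it : List (String × Option String)) (comma : String) : String :=
  let exPart := match dget it "example" with
    | some e => if e ≠ "" then ", example: '" ++ jsEscape e ++ "'" else ""
    | none => ""
  "        { token: '" ++ jsEscape ((dget it "token").getD "") ++ "', type: '"
    ++ jsEscape ((dget it "type").getD "") ++ "', description: '"
    ++ jsEscape ((dget it "description").getD "") ++ "'" ++ exPart ++ " }" ++ comma

def to_python_dictionary_js_alt (merged_items : List (String × List (String × Option String))) : String :=
  let sections : List (String × String) :=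
    [("Keywords", "keyword"), ("Builtins", "builtin"), ("Operators & Delimiters", "operator")]
  let groups0 : PySem.Dict String (List (List (String × Option String))) :=
    PySem.Dict.ofList (sections.map (fun s => (s.2, [])))
  let groups := ((PySem.Dict.ofList merged_items).values).foldl (fun g it =>
    match dget it "type" with
    | some t => if g.contains t then g.insert t (g.getD t [] ++ [it]) else g
    | none => g) groups0
  let head := "// Auto-generated from Python_Dictionary.md. Do not edit manually.\nmodule.exports = {\n  title: 'Python Language Reference',\n  sections: [\n"
  let blocks := (PySem.List.enumerate sections).map (fun st =>
    let si := st.1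
    let title := st.2.1
    let typ := st.2.2
    let items := PySem.List.sorted (groups.getD typ []) (fun x => PySem.Str.lower ((dget x "token").getD ""))
    let body := PySem.Str.join "\n" ((PySem.List.enumerate items).map (fun p =>
      itemLineB p.2 (if p.1 < (items.length : Int) - 1 then "," else "")))
    "    {\n      title: '" ++ jsEscape title ++ "',\n      items: [\n"
      ++ (if items.isEmpty then "" else body ++ "\n")
      ++ "      ]\n    }" ++ (if si < (sections.length : Int) - 1 then "," else ""))
  head ++ PySem.Str.join "\n" blocks ++ "\n  ]\n};\n"

-- ===== PRECONDITION & SPEC =====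
def Spec_to_python_dictionary_js (merged_items : List (String × List (String × Option String))) (out : String) : Prop := out = to_python_dictionary_js_alt merged_items
instance (merged_items : List (String × List (String × Option String))) (out : String) : Decidable (Spec_to_python_dictionary_js merged_items out) := by unfold Spec_to_python_dictionary_js; infer_instance

-- ===== CLAIM (what is proved, stated in full; the proofs are below) =====
def Claim_equal_to_python_dictionary_js : Prop := ∀ (merged_items : List (String × List (String × Option String))), Dom_to_python_dictionary_js merged_items → Spec_to_python_dictionary_js merged_items (to_python_dictionary_js merged_items)

-- ===== LEMMAS AND PROOFS =====
theorem strJoin_cons_cons (sep a b : String) (rest : List String) :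
    PySem.Str.join sep (a :: b :: rest) = a ++ sep ++ PySem.Str.join sep (b :: rest) := by
  apply String.toList_inj.mp
  simp [PySem.Str.toList_join, PySem.Chars.join_cons_cons]

theorem strJoin_singleton (sep a : String) : PySem.Str.join sep [a] = a := by
  apply String.toList_inj.mp
  simp [PySem.Str.toList_join, PySem.Chars.join_singleton]

theorem strJoin_append (sep : String) (xs ys : List String) (hx : xs ≠ []) (hy : ys ≠ []) :
    PySem.Str.join sep (xs ++ ys) = PySem.Str.join sep xs ++ sep ++ PySem.Str.join sep ys := by
  induction xs with
  | nil => exact absurd rfl hx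
  | cons a t ih =>
    cases t with
    | nil =>
      cases ys with
      | nil => exact absurd rfl hy
      | cons b r => simp only [List.singleton_append, strJoin_cons_cons, strJoin_singleton]
    | cons b t' =>
      rw [show ((a :: b :: t') ++ ys) = a :: b :: (t' ++ ys) from rfl]
      rw [strJoin_cons_cons]
      rw [show (b :: (t' ++ ys)) = ((b :: t') ++ ys) from rfl, ih (by simp)]
      rw [strJoin_cons_cons]
      simp [String.append_assoc]

def mapLines (its : List (List (String × Option String))) : List String :=
  (PySem.List.enumerate its).map (fun p =>
    itemLineB p.2 (if p.1 < (its.length : Int) - 1 then "," else ""))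

def blockLines (tt : String) (its : List (List (String × Option String))) (c : String) : List String :=
  ["    {", "      title: '" ++ tt ++ "',", "      items: ["] ++ mapLines its ++ ["      ]", "    }" ++ c]

def blockStr (tt : String) (its : List (List (String × Option String))) (c : String) : String :=
  "    {\n      title: '" ++ tt ++ "',\n      items: [\n"
    ++ (if its.isEmpty then "" else PySem.Str.join "\n" (mapLines its) ++ "\n")
    ++ "      ]\n    }" ++ c

theorem mapLines_nil : mapLines [] = [] := rfl
theorem mapLines_ne_nil (its : List (List (String × Option String))) (h : its ≠ []) :
    mapLines its ≠ [] := by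
  cases its with
  | nil => exact absurd rfl h
  | cons a t => simp [mapLines, PySem.List.enumerate]

theorem block_eq (tt : String) (its : List (List (String × Option String))) (c : String) :
    PySem.Str.join "\n" (blockLines tt its c) = blockStr tt its c := by
  cases hits : its with
  | nil =>
    rw [blockLines, blockStr, mapLines_nil]
    simp only [List.isEmpty_nil, if_true, List.append_nil, List.nil_append, List.cons_append]
    rw [strJoin_cons_cons, strJoin_cons_cons, strJoin_cons_cons, strJoin_cons_cons, strJoin_singleton]
    apply String.toList_inj.mp; simp
  | cons a t =>
    rw [blockLines, blockStr]
    have hne : mapLines (a :: t) ≠ [] := mapLines_ne_nil _ (by simp)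
    rw [show (["    {", "      title: '" ++ tt ++ "',", "      items: ["] ++ mapLines (a :: t) ++ ["      ]", "    }" ++ c])
        = (["    {", "      title: '" ++ tt ++ "',", "      items: ["] ++ (mapLines (a :: t) ++ ["      ]", "    }" ++ c])) by simp]
    rw [strJoin_append _ _ _ (by simp) (by simp [hne])]
    rw [strJoin_append _ _ _ hne (by simp)]
    rw [strJoin_cons_cons, strJoin_cons_cons, strJoin_singleton, strJoin_cons_cons, strJoin_singleton]
    simp only [List.isEmpty_cons]
    rw [if_neg (by simp)]
    apply String.toList_inj.mp; simp [String.append_assoc]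

def secItems (mi : List (String × List (String × Option String))) (typ : String) :
    List (List (String × Option String)) :=
  PySem.List.sorted (((PySem.Dict.ofList mi).values).filter (fun it => dget it "type" == some typ))
    (fun x => PySem.Str.lower ((dget x "token").getD ""))

theorem flatMap_single {α β : Type} (f : α → β) (l : List α) :
    l.flatMap (fun x => [f x]) = l.map f := by
  induction l with | nil => rfl | cons a t ih => simp [ih]

theorem hA (mi : List (String × List (String × Option String))) :
    to_python_dictionary_js mi = PySem.Str.join "\n"
      (["// Auto-generated from Python_Dictionary.md. Do not edit manually.",
        "module.exports = {", "  title: 'Python Language Reference'," , "  sections: ["]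
       ++ blockLines (jsEscape "Keywords") (secItems mi "keyword") ","
       ++ blockLines (jsEscape "Builtins") (secItems mi "builtin") ","
       ++ blockLines (jsEscape "Operators & Delimiters") (secItems mi "operator") ""
       ++ ["  ]", "};", ""]) := by
  simp only [to_python_dictionary_js, PySem.List.enumerate, List.foldl_cons, List.foldl_nil,
    PySem.List.foldl_append_eq_flatMap, flatMap_single, blockLines, mapLines, itemLineB,
    secItems]
  norm_num
theorem grp_invariant (xs : List (List (String × Option String)))
    (g : PySem.Dict String (List (List (String × Option String)))) (typ : String)
    (hc : g.contains typ = true) :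
    (xs.foldl (fun g it =>
      match dget it "type" with
      | some t => if g.contains t then g.insert t (g.getD t [] ++ [it]) else g
      | none => g) g).getD typ []
    = g.getD typ [] ++ xs.filter (fun it => dget it "type" == some typ) := by
  induction xs generalizing g with
  | nil => simp
  | cons it xs ih =>
    simp only [List.foldl_cons, List.filter_cons]
    cases h : dget it "type" with
    | none =>
      simp only [h]
      rw [ih g hc]; simp
    | some t =>
      by_cases ht : t = typ
      · subst ht
        simp only [h, hc, if_true]
        rw [ih _ (by simp [PySem.Dict.contains_insert, hc])]
        rw [PySem.Dict.getD_insert_self]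
        simp
      · by_cases hct : g.contains t = true
        · simp only [h, hct, if_true]
          rw [ih _ (by simp [PySem.Dict.contains_insert, hc])]
          rw [PySem.Dict.getD_insert_of_ne _ _ _ (fun e => ht e.symm)]
          simp [ht]
        · have hcf : g.contains t = false := by simpa using hct
          simp only [h, hcf]
          rw [if_neg (by simp)]
          rw [ih g hc]
          simp [ht]

theorem hB (mi : List (String × List (String × Option String))) :
    to_python_dictionary_js_alt mi =
      "// Auto-generated from Python_Dictionary.md. Do not edit manually.\nmodule.exports = {\n  title: 'Python Language Reference',\n  sections: [\n"
      ++ PySem.Str.join "\n"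
          [blockStr (jsEscape "Keywords") (secItems mi "keyword") ",",
           blockStr (jsEscape "Builtins") (secItems mi "builtin") ",",
           blockStr (jsEscape "Operators & Delimiters") (secItems mi "operator") ""]
      ++ "\n  ]\n};\n" := by
  have hck : (PySem.Dict.ofList [("keyword",([]:List (List (String × Option String)))), ("builtin",[]), ("operator",[])]).contains "keyword" = true := by rfl
  have hcb : (PySem.Dict.ofList [("keyword",([]:List (List (String × Option String)))), ("builtin",[]), ("operator",[])]).contains "builtin" = true := by rfl
  have hco : (PySem.Dict.ofList [("keyword",([]:List (List (String × Option String)))), ("builtin",[]), ("operator",[])]).contains "operator" = true := by rfl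
  have h0k : (PySem.Dict.ofList [("keyword",([]:List (List (String × Option String)))), ("builtin",[]), ("operator",[])]).getD "keyword" [] = [] := by rfl
  have h0b : (PySem.Dict.ofList [("keyword",([]:List (List (String × Option String)))), ("builtin",[]), ("operator",[])]).getD "builtin" [] = [] := by rfl
  have h0o : (PySem.Dict.ofList [("keyword",([]:List (List (String × Option String)))), ("builtin",[]), ("operator",[])]).getD "operator" [] = [] := by rfl
  simp only [to_python_dictionary_js_alt, PySem.List.enumerate, List.map_cons, List.map_nil]
  simp only [grp_invariant _ _ _ hck, grp_invariant _ _ _ hcb, grp_invariant _ _ _ hco,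
    h0k, h0b, h0o]
  simp only [blockStr, mapLines, secItems, List.nil_append]
  norm_num
theorem main (mi : List (String × List (String × Option String))) :
    to_python_dictionary_js mi = to_python_dictionary_js_alt mi := by
  rw [hA, hB, ← block_eq, ← block_eq, ← block_eq]
  have hbl : ∀ (tt : String) (its : List (List (String × Option String))) (c : String),
      blockLines tt its c ≠ [] := by intro tt its c; simp [blockLines]
  rw [strJoin_append _ _ _ (by simp [blockLines]) (by simp),
      strJoin_append _ _ _ (by simp [blockLines]) (hbl _ _ _),
      strJoin_append _ _ _ (by simp [blockLines]) (hbl _ _ _),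
      strJoin_append _ _ _ (by simp) (hbl _ _ _)]
  have hL0 : PySem.Str.join "\n"
      ["// Auto-generated from Python_Dictionary.md. Do not edit manually.",
        "module.exports = {", "  title: 'Python Language Reference'," , "  sections: ["]
      = "// Auto-generated from Python_Dictionary.md. Do not edit manually.\nmodule.exports = {\n  title: 'Python Language Reference',\n  sections: [" := by
    rw [strJoin_cons_cons, strJoin_cons_cons, strJoin_cons_cons, strJoin_singleton]
    apply String.toList_inj.mp; simp
  have hT : PySem.Str.join "\n" ["  ]", "};", ""] = "  ]\n};\n" := by
    rw [strJoin_cons_cons, strJoin_cons_cons, strJoin_singleton]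
    apply String.toList_inj.mp; simp
  rw [hL0, hT]
  have j3 : ∀ (a b c : String), PySem.Str.join "\n" [a,b,c] = a ++ "\n" ++ b ++ "\n" ++ c := by
    intro a b c
    rw [strJoin_cons_cons, strJoin_cons_cons, strJoin_singleton]
    simp [String.append_assoc]
  rw [j3]
  apply String.toList_inj.mp
  simp [String.append_assoc]

-- ===== VERDICT (by name: the statement is the Claim_ definition above) =====
theorem to_python_dictionary_js_spec : Claim_equal_to_python_dictionary_js := by
  intro mi _h
  unfold Spec_to_python_dictionary_js
  exact main mi
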